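-- pv_equiv track=rewrite | github.com/zcvfcat/algorithm | .test/dfs.py | dfs
-- ===== SOURCE A (Python) =====
-- def dfs(graph, start_node):
--     node_length = len(graph) - 1
--     visited = [False for _ in range(node_length + 1)]
--
--     stack = [(start_node)]
--     visited[start_node] = True
--
--     while stack:
--         node = stack.pop()
--         for edge in graph[node]:
--             if visited[edge] is False:
--                 visited[edge] = True
--                 stack.append(edge)
--
--     return visited
-- ===== SOURCE B (Python) =====
-- def dfs(graph, start_node):
--     # Round-based saturation: start from start_node and repeatedly sweep all
--     # nodes, marking every edge of an already-marked node, until a full sweep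
--     # changes nothing.  No stack/worklist is maintained.
--     visited = [False] * len(graph)
--     visited[start_node] = True
--     changed = True
--     while changed:
--         changed = False
--         for node in range(len(graph)):
--             if visited[node]:
--                 for edge in graph[node]:
--                     if not visited[edge]:
--                         visited[edge] = True
--                         changed = True
--     return visited
-- ===== Notes on version B (the rewrite author's own statement) =====
-- stated objective: alternative
-- what changed: Replaced the explicit-stack DFS worklist by a round-based fixpoint saturation: repeatedly sweep every node and mark all edges of already-marked nodes until a sweep changes nothing; no stack is kept.
import Mathlib
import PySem

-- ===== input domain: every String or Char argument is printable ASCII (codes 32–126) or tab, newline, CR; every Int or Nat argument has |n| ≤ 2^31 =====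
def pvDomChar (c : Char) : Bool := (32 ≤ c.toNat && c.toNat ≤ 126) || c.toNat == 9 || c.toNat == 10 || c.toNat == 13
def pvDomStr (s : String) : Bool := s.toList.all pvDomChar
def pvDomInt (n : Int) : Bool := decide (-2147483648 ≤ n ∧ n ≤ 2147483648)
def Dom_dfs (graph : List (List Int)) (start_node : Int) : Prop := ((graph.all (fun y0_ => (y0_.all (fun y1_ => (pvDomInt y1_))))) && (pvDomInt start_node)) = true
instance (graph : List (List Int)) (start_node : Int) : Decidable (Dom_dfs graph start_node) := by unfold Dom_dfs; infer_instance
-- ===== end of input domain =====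

-- B replaces A's explicit-stack DFS by round-based fixpoint saturation (sweep all
-- nodes, marking every edge of a marked node, until a sweep changes nothing);
-- same returned visited list on Pre_ (valid start index).

-- Shared index helpers: both Pythons read/write `visited[i]` and `graph[i]` the
-- same way, including Python's negative-index wraparound, which `cell` models
-- exactly (none = the access raises IndexError in Python; there the helpers
-- return a neutral value only to keep the functions total — Python never
-- returns from such a run, both Pythons raise identically).
def cell (n : Nat) (i : Int) : Option Nat :=
  if 0 ≤ i ∧ i < (n : Int) then some i.toNat
  else if -(n : Int) ≤ i ∧ i < 0 then some (i + (n : Int)).toNat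
  else none

def vget (v : List Bool) (i : Int) : Bool :=
  match cell v.length i with
  | some k => v.getD k false
  | none => true

def vset (v : List Bool) (i : Int) : List Bool :=
  match cell v.length i with
  | some k => v.set k true
  | none => v

def adj (g : List (List Int)) (i : Int) : List Int :=
  match cell g.length i with
  | some k => g.getD k []
  | none => []

def cntF (v : List Bool) : Nat := v.count false

-- ----- termination helpers (cited by the ports' decreasing_by) -----
theorem cell_lt {n : Nat} {i : Int} {k : Nat} (h : cell n i = some k) : k < n := by
  unfold cell at h
  split_ifs at h <;> simp_all <;> omega

theorem vset_some {v : List Bool} {i : Int} {k : Nat} (h : cell v.length i = some k) :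
    vset v i = v.set k true := by
  unfold vset; rw [h]

theorem vget_false {v : List Bool} {i : Int} (h : vget v i = false) :
    ∃ k, cell v.length i = some k ∧ v.getD k false = false := by
  unfold vget at h
  cases hc : cell v.length i with
  | none => rw [hc] at h; exact absurd h (by simp)
  | some k => rw [hc] at h; exact ⟨k, rfl, h⟩

theorem count_set_true_lt (v : List Bool) (k : Nat) (hk : k < v.length)
    (hv : v.getD k false = false) : (v.set k true).count false < v.count false := by
  induction v generalizing k with
  | nil => simp at hk
  | cons a t ih =>
    cases k with
    | zero => simp at hv; subst hv; simp
    | succ k =>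
      simp at hk hv
      have := ih k hk hv
      simp only [List.set, List.count_cons]
      omega

theorem cntF_vset_lt (v : List Bool) (i : Int) (h : vget v i = false) :
    cntF (vset v i) < cntF v := by
  obtain ⟨k, hc, hf⟩ := vget_false h
  rw [cntF, cntF, vset_some hc]
  exact count_set_true_lt v k (cell_lt hc) hf

-- ===== PORT A =====
-- Python A's stack is modelled with the list HEAD as the stack top
-- (append = cons, pop = head), which reproduces pop()/append() order exactly.
def stepEdges (v : List Bool) (st : List Int) (es : List Int) : List Bool × List Int :=
  es.foldl (fun p e => if vget p.1 e = false then (vset p.1 e, e :: p.2) else p) (v, st)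

theorem stepEdges_nil (v : List Bool) (st : List Int) : stepEdges v st [] = (v, st) := rfl

theorem stepEdges_cons (v : List Bool) (st : List Int) (e : Int) (es : List Int) :
    stepEdges v st (e :: es) =
      if vget v e = false then stepEdges (vset v e) (e :: st) es else stepEdges v st es := by
  unfold stepEdges
  rw [List.foldl_cons]
  split <;> rfl

theorem stepEdges_measure (es : List Int) : ∀ (v : List Bool) (st : List Int),
    cntF (stepEdges v st es).1 + (stepEdges v st es).2.length ≤ cntF v + st.length := by
  induction es with
  | nil => intro v st; rw [stepEdges_nil]
  | cons e es ih =>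
    intro v st
    rw [stepEdges_cons]
    split
    · rename_i h
      have h1 := ih (vset v e) (e :: st)
      have h2 := cntF_vset_lt v e h
      simp only [List.length_cons] at h1
      omega
    · exact ih v st

def dfsLoop (g : List (List Int)) (v : List Bool) (st : List Int) : List Bool :=
  match st with
  | [] => v
  | node :: rest => dfsLoop g (stepEdges v rest (adj g node)).1 (stepEdges v rest (adj g node)).2
termination_by cntF v + st.length
decreasing_by
  have h := stepEdges_measure (adj g node) v rest
  simp only [List.length_cons]
  omega

def dfs (graph : List (List Int)) (start_node : Int) : List Bool :=
  let node_length : Int := (graph.length : Int) - 1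
  let visited := List.replicate (node_length + 1).toNat false
  dfsLoop graph (vset visited start_node) [start_node]

-- ===== PORT B =====
def markEdges (v : List Bool) (c : Bool) (es : List Int) : List Bool × Bool :=
  es.foldl (fun p e => if vget p.1 e = false then (vset p.1 e, true) else p) (v, c)

def sweep (g : List (List Int)) (v : List Bool) : List Bool × Bool :=
  (PySem.List.pyRange 0 g.length 1).foldl
    (fun p node => if vget p.1 node = true then markEdges p.1 p.2 (adj g node) else p)
    (v, false)

-- ----- termination helpers for fixLoop (cited by its decreasing_by) -----
theorem markEdges_nil (v : List Bool) (c : Bool) : markEdges v c [] = (v, c) := rfl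

theorem markEdges_cons (v : List Bool) (c : Bool) (e : Int) (es : List Int) :
    markEdges v c (e :: es) =
      if vget v e = false then markEdges (vset v e) true es else markEdges v c es := by
  unfold markEdges
  rw [List.foldl_cons]
  split <;> rfl

theorem markEdges_cnt (es : List Int) : ∀ (v : List Bool) (c : Bool),
    cntF (markEdges v c es).1 ≤ cntF v ∧
    ((markEdges v c es).2 = true → c = true ∨ cntF (markEdges v c es).1 < cntF v) := by
  induction es with
  | nil => intro v c; rw [markEdges_nil]; exact ⟨le_rfl, fun h => Or.inl h⟩
  | cons e es ih =>
    intro v c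
    rw [markEdges_cons]
    split
    · rename_i h
      have h1 := ih (vset v e) true
      have h2 := cntF_vset_lt v e h
      exact ⟨h1.1.trans (le_of_lt h2), fun _ => Or.inr (lt_of_le_of_lt h1.1 h2)⟩
    · exact ih v c

theorem sweepGo_cnt (g : List (List Int)) (ns : List Int) : ∀ (p : List Bool × Bool),
    cntF (ns.foldl (fun p node => if vget p.1 node = true then markEdges p.1 p.2 (adj g node) else p) p).1 ≤ cntF p.1 ∧
    ((ns.foldl (fun p node => if vget p.1 node = true then markEdges p.1 p.2 (adj g node) else p) p).2 = true →
      p.2 = true ∨ cntF (ns.foldl (fun p node => if vget p.1 node = true then markEdges p.1 p.2 (adj g node) else p) p).1 < cntF p.1) := by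
  induction ns with
  | nil => intro p; exact ⟨le_rfl, fun h => Or.inl h⟩
  | cons n ns ih =>
    intro p
    rw [List.foldl_cons]
    split
    · have hm := markEdges_cnt (adj g n) p.1 p.2
      have hi := ih (markEdges p.1 p.2 (adj g n))
      refine ⟨hi.1.trans hm.1, fun ht => ?_⟩
      rcases hi.2 ht with h2 | h2
      · rcases hm.2 h2 with h3 | h3
        · exact Or.inl h3
        · exact Or.inr (lt_of_le_of_lt hi.1 h3)
      · exact Or.inr (lt_of_lt_of_le h2 hm.1)
    · exact ih p

theorem sweep_changed (g : List (List Int)) (v : List Bool)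
    (h : (sweep g v).2 = true) : cntF (sweep g v).1 < cntF v := by
  have := sweepGo_cnt g (PySem.List.pyRange 0 g.length 1) (v, false)
  unfold sweep at h ⊢
  rcases this.2 h with h2 | h2
  · simp at h2
  · exact h2

def fixLoop (g : List (List Int)) (v : List Bool) : List Bool :=
  if hch : (sweep g v).2 = true then fixLoop g (sweep g v).1 else (sweep g v).1
termination_by cntF v
decreasing_by exact sweep_changed g v hch

def dfs_alt (graph : List (List Int)) (start_node : Int) : List Bool :=
  let visited := List.replicate graph.length false
  fixLoop graph (vset visited start_node)

-- ===== PRECONDITION & SPEC =====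
-- Pre_dfs holds exactly when Python A returns: the start index is a valid
-- Python index and every row reachable from it through valid indices contains
-- only valid indices (on any other input both Pythons raise IndexError).
-- rstep/rclos compute that reachable closure of canonical row indices.
def rstep (g : List (List Int)) (cur : List Nat) : List Nat :=
  (cur ++ cur.flatMap (fun k => (g.getD k []).filterMap (cell g.length))).dedup

def rclos (g : List (List Int)) : Nat → List Nat → List Nat
  | 0, cur => cur
  | fuel + 1, cur => rclos g fuel (rstep g cur)

def Pre_dfs (graph : List (List Int)) (start_node : Int) : Prop :=
  (cell graph.length start_node).toList ≠ [] ∧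
  ∀ k ∈ rclos graph graph.length (cell graph.length start_node).toList,
    ∀ e ∈ graph.getD k [], (cell graph.length e).isSome
instance (graph : List (List Int)) (start_node : Int) : Decidable (Pre_dfs graph start_node) := by
  unfold Pre_dfs; infer_instance

def pvWitness_dfs : List (List Int) × Int := ([[1, 2], [0], [2], []], 0)

def Spec_dfs (graph : List (List Int)) (start_node : Int) (out : List Bool) : Prop := out = dfs_alt graph start_node
instance (graph : List (List Int)) (start_node : Int) (out : List Bool) : Decidable (Spec_dfs graph start_node out) := by unfold Spec_dfs; infer_instance

-- ===== CLAIM (what is proved, stated in full; the proofs are below) =====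
def Claim_equal_dfs : Prop := ∀ (graph : List (List Int)) (start_node : Int), Dom_dfs graph start_node → Pre_dfs graph start_node → Spec_dfs graph start_node (dfs graph start_node)

-- ===== LEMMAS AND PROOFS =====

theorem vget_some {v : List Bool} {i : Int} {k : Nat} (h : cell v.length i = some k) :
    vget v i = v.getD k false := by
  unfold vget; rw [h]

theorem vset_none' {v : List Bool} {i : Int} (h : cell v.length i = none) :
    vset v i = v := by
  unfold vset; rw [h]

-- canonical-cell reachability from start_node along graph edges
inductive ReachC (g : List (List Int)) (s : Int) : Nat → Prop where
  | refl {k : Nat} : cell g.length s = some k → ReachC g s k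
  | step {x k : Nat} {e : Int} : ReachC g s x → e ∈ g.getD x [] →
      cell g.length e = some k → ReachC g s k

theorem adj_some {g : List (List Int)} {i : Int} {k : Nat} (h : cell g.length i = some k) :
    adj g i = g.getD k [] := by
  unfold adj; rw [h]

theorem length_vset (v : List Bool) (i : Int) : (vset v i).length = v.length := by
  unfold vset
  cases cell v.length i <;> simp

theorem getD_big {v : List Bool} {k : Nat} (h : v.length ≤ k) : v.getD k false = false :=
  List.getD_eq_default _ _ h

theorem getD_set_self {v : List Bool} {k : Nat} (hk : k < v.length) :
    (v.set k true).getD k false = true := by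
  rw [List.getD_eq_getElem _ _ (by simpa using hk), List.getElem_set_self]

theorem getD_set_other {v : List Bool} {k j : Nat} (hne : k ≠ j) :
    (v.set k true).getD j false = v.getD j false := by
  by_cases hj : j < v.length
  · rw [List.getD_eq_getElem _ _ (by simpa using hj), List.getD_eq_getElem _ _ hj,
        List.getElem_set_ne hne]
  · have hj' : v.length ≤ j := by omega
    rw [List.getD_eq_default _ _ (by simpa using hj'), List.getD_eq_default _ _ hj']

theorem mk_set_mono {v : List Bool} {k j : Nat} (h : v.getD j false = true) :
    (v.set k true).getD j false = true := by
  by_cases he : k = j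
  · subst he
    have hk : k < v.length := by
      by_contra hc
      rw [getD_big (by omega)] at h
      exact absurd h (by simp)
    exact getD_set_self hk
  · rw [getD_set_other he]; exact h

theorem mk_set_origin {v : List Bool} {k j : Nat} (h : (v.set k true).getD j false = true) :
    v.getD j false = true ∨ j = k := by
  by_cases he : k = j
  · exact Or.inr he.symm
  · rw [getD_set_other he] at h; exact Or.inl h

theorem mk_vset_mono {v : List Bool} {i : Int} {j : Nat} (h : v.getD j false = true) :
    (vset v i).getD j false = true := by
  unfold vset
  cases cell v.length i with
  | none => exact h
  | some k => exact mk_set_mono h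

theorem mk_vset_origin {v : List Bool} {i : Int} {j : Nat}
    (h : (vset v i).getD j false = true) :
    v.getD j false = true ∨ cell v.length i = some j := by
  cases hc : cell v.length i with
  | none => rw [vset_none' hc] at h; exact Or.inl h
  | some k =>
    rw [vset_some hc] at h
    rcases mk_set_origin h with h1 | h1
    · exact Or.inl h1
    · exact Or.inr (by rw [h1])

theorem vget_of_mk {v w : List Bool} (hl : w.length = v.length)
    (hm : ∀ k, v.getD k false = true → w.getD k false = true) {i : Int}
    (h : vget v i = true) : vget w i = true := by
  unfold vget at h ⊢
  rw [hl]
  cases hc : cell v.length i with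
  | none => rfl
  | some k =>
    rw [hc] at h
    exact hm k h

theorem vget_vset_anti {v : List Bool} {i j : Int}
    (h : vget (vset v i) j = false) : vget v j = false := by
  cases hvj : vget v j
  · rfl
  · have := vget_of_mk (length_vset v i) (fun _ hk => mk_vset_mono hk) hvj
    rw [this] at h
    exact absurd h (by simp)

theorem mk_replicate {m k : Nat} : (List.replicate m false).getD k false = false := by
  by_cases hk : k < m
  · rw [List.getD_eq_getElem _ _ (by simpa using hk), List.getElem_replicate]
  · exact getD_big (by simpa using (by omega : m ≤ k))

theorem cell_natCast {n k : Nat} (hk : k < n) : cell n (k : Int) = some k := by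
  unfold cell
  have : 0 ≤ (k : Int) ∧ (k : Int) < (n : Int) := by omega
  rw [if_pos this]
  simp

-- invariant of A's while-loop
def InvA (g : List (List Int)) (s : Int) (v : List Bool) (st : List Int) : Prop :=
  v.length = g.length ∧
  (∀ ks, cell g.length s = some ks → v.getD ks false = true) ∧
  (∀ j ∈ st, ∃ k, cell g.length j = some k ∧ v.getD k false = true) ∧
  (∀ k, v.getD k false = true → ReachC g s k) ∧
  (∀ k, v.getD k false = true → (∀ j ∈ st, cell g.length j ≠ some k) →
    ∀ e ∈ g.getD k [], vget v e = true)

theorem stepEdges_props (es : List Int) : ∀ (v : List Bool) (st : List Int),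
    ((stepEdges v st es).1.length = v.length) ∧
    (∀ k, v.getD k false = true → (stepEdges v st es).1.getD k false = true) ∧
    (∀ k, (stepEdges v st es).1.getD k false = true →
      v.getD k false = true ∨ ∃ e ∈ es, cell v.length e = some k) ∧
    (∀ e ∈ es, vget (stepEdges v st es).1 e = true) ∧
    (∀ j ∈ st, j ∈ (stepEdges v st es).2) ∧
    (∀ j ∈ (stepEdges v st es).2, j ∈ st ∨ (j ∈ es ∧ vget v j = false)) ∧
    (∀ k, v.getD k false = false → (stepEdges v st es).1.getD k false = true →
      ∃ j ∈ (stepEdges v st es).2, cell v.length j = some k) := by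
  induction es with
  | nil =>
    intro v st
    rw [stepEdges_nil]
    refine ⟨rfl, fun _ h => h, fun _ h => Or.inl h, by simp, fun _ h => h,
      fun _ h => Or.inl h, ?_⟩
    intro k hf ht
    rw [hf] at ht
    exact absurd ht (by simp)
  | cons e es ih =>
    intro v st
    rw [stepEdges_cons]
    by_cases hve : vget v e = false
    · rw [if_pos hve]
      obtain ⟨ke, hce, hfe⟩ := vget_false hve
      have hL := length_vset v e
      obtain ⟨l1, mono, orig, all, grow, sorg, newst⟩ := ih (vset v e) (e :: st)
      have hmk_e : (vset v e).getD ke false = true := by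
        rw [vset_some hce]
        exact getD_set_self (cell_lt hce)
      refine ⟨l1.trans hL, ?_, ?_, ?_, ?_, ?_, ?_⟩
      · exact fun k h => mono k (mk_vset_mono h)
      · intro k h
        rcases orig k h with h1 | h1
        · rcases mk_vset_origin h1 with h2 | h2
          · exact Or.inl h2
          · exact Or.inr ⟨e, List.mem_cons_self .., h2⟩
        · obtain ⟨e', he', hc'⟩ := h1
          rw [hL] at hc'
          exact Or.inr ⟨e', List.mem_cons_of_mem _ he', hc'⟩
      · intro e' he'
        rcases List.mem_cons.mp he' with h1 | h1
        · have hcf : cell (stepEdges (vset v e) (e :: st) es).1.length e' = some ke := by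
            rw [l1, hL, h1]; exact hce
          rw [vget_some hcf]
          exact mono ke hmk_e
        · exact all _ h1
      · exact fun j h => grow j (List.mem_cons_of_mem _ h)
      · intro j h
        rcases sorg j h with h1 | h1
        · rcases List.mem_cons.mp h1 with h2 | h2
          · exact Or.inr ⟨h2 ▸ List.mem_cons_self .., h2 ▸ hve⟩
          · exact Or.inl h2
        · exact Or.inr ⟨List.mem_cons_of_mem _ h1.1, vget_vset_anti h1.2⟩
      · intro k hkf hkt
        by_cases hmid : (vset v e).getD k false = false
        · obtain ⟨j, hj1, hj2⟩ := newst k hmid hkt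
          rw [hL] at hj2
          exact ⟨j, hj1, hj2⟩
        · have hmid' : (vset v e).getD k false = true := by
            cases h : (vset v e).getD k false
            · exact absurd h hmid
            · rfl
          rcases mk_vset_origin hmid' with h1 | h1
          · rw [h1] at hkf; simp at hkf
          · exact ⟨e, grow e (List.mem_cons_self ..), h1⟩
    · rw [if_neg hve]
      have hve' : vget v e = true := by
        cases h : vget v e
        · exact absurd h hve
        · rfl
      obtain ⟨l1, mono, orig, all, grow, sorg, newst⟩ := ih v st
      refine ⟨l1, mono, ?_, ?_, grow, ?_, newst⟩
      · intro k h
        rcases orig k h with h1 | h1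
        · exact Or.inl h1
        · obtain ⟨e', he', hc'⟩ := h1
          exact Or.inr ⟨e', List.mem_cons_of_mem _ he', hc'⟩
      · intro e' he'
        rcases List.mem_cons.mp he' with h1 | h1
        · subst h1
          exact vget_of_mk l1 mono hve'
        · exact all _ h1
      · intro j h
        rcases sorg j h with h1 | h1
        · exact Or.inl h1
        · exact Or.inr ⟨List.mem_cons_of_mem _ h1.1, h1.2⟩

theorem stepEdges_inv {g : List (List Int)} {s : Int} {v : List Bool} {node : Int}
    {rest : List Int} (hInv : InvA g s v (node :: rest)) :
    InvA g s (stepEdges v rest (adj g node)).1 (stepEdges v rest (adj g node)).2 := by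
  obtain ⟨hlen, hs, hst, hreach, hclo⟩ := hInv
  obtain ⟨kn, hcn, hmn⟩ := hst node (List.mem_cons_self ..)
  have hRn : ReachC g s kn := hreach kn hmn
  have hes : adj g node = g.getD kn [] := adj_some hcn
  obtain ⟨l1, mono, orig, all, grow, sorg, newst⟩ := stepEdges_props (adj g node) v rest
  refine ⟨l1.trans hlen, ?_, ?_, ?_, ?_⟩
  · exact fun ks h => mono ks (hs ks h)
  · intro j hj
    rcases sorg j hj with h1 | h1
    · obtain ⟨k, hc, hm⟩ := hst j (List.mem_cons_of_mem _ h1)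
      exact ⟨k, hc, mono k hm⟩
    · obtain ⟨k, hc, _⟩ := vget_false h1.2
      rw [hlen] at hc
      have := all j h1.1
      rw [vget_some (by rw [l1, hlen]; exact hc)] at this
      exact ⟨k, hc, this⟩
  · intro k hm
    rcases orig k hm with h1 | h1
    · exact hreach k h1
    · obtain ⟨e, he, hc⟩ := h1
      rw [hlen] at hc
      exact ReachC.step hRn (hes ▸ he) hc
  · intro k hm hnost e he
    by_cases hmk : v.getD k false = true
    · by_cases hkkn : k = kn
      · subst hkkn
        exact all e (hes ▸ he)
      · have hnold : ∀ j ∈ node :: rest, cell g.length j ≠ some k := by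
          intro j hj
          rcases List.mem_cons.mp hj with h2 | h2
          · subst h2
            rw [hcn]
            intro hx
            exact hkkn (Option.some_injective _ hx).symm
          · intro hx
            exact hnost j (grow j h2) hx
        exact vget_of_mk l1 mono (hclo k hmk hnold e he)
    · have hmk' : v.getD k false = false := by
        cases h : v.getD k false
        · rfl
        · exact absurd h hmk
      obtain ⟨j, hj1, hj2⟩ := newst k hmk' hm
      rw [hlen] at hj2
      exact absurd hj2 (hnost j hj1)

theorem dfsLoop_post (g : List (List Int)) (s : Int) :
    ∀ (v : List Bool) (st : List Int), InvA g s v st → InvA g s (dfsLoop g v st) [] := by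
  intro v st
  fun_induction dfsLoop g v st with
  | case1 => exact fun h => h
  | case2 v node rest ih => exact fun h => ih (stepEdges_inv h)

-- a marking that contains the start cell, is reachable-only and closed under
-- edges is exactly ReachC
theorem marks_char {g : List (List Int)} {s : Int} {w : List Bool}
    (hlen : w.length = g.length)
    (hs : ∀ ks, cell g.length s = some ks → w.getD ks false = true)
    (hR : ∀ k, w.getD k false = true → ReachC g s k)
    (hC : ∀ k, w.getD k false = true → ∀ e ∈ g.getD k [], vget w e = true) :
    ∀ k, (w.getD k false = true ↔ ReachC g s k) := by
  intro k
  refine ⟨hR k, fun hr => ?_⟩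
  induction hr with
  | refl hks => exact hs _ hks
  | step hx he hce ihx =>
    have := hC _ ihx _ he
    rw [vget_some (by rw [hlen]; exact hce)] at this
    exact this

theorem cell_start {g : List (List Int)} {s : Int} (hP : Pre_dfs g s) :
    ∃ ks, cell g.length s = some ks := by
  obtain ⟨h1, -⟩ := hP
  cases hc : cell g.length s with
  | none => rw [hc] at h1; simp at h1
  | some k => exact ⟨k, rfl⟩

theorem dfs_char {g : List (List Int)} {s : Int} (hP : Pre_dfs g s) :
    (dfs g s).length = g.length ∧
    ∀ k, ((dfs g s).getD k false = true ↔ ReachC g s k) := by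
  obtain ⟨ks, hks⟩ := cell_start hP
  have hrep : ((g.length : Int) - 1 + 1).toNat = g.length := by omega
  have hlen0 : (List.replicate ((g.length : Int) - 1 + 1).toNat false).length = g.length := by
    rw [List.length_replicate, hrep]
  have hks0 : cell (List.replicate ((g.length : Int) - 1 + 1).toNat false).length s = some ks := by
    rw [hlen0]; exact hks
  have hv1 : vset (List.replicate ((g.length : Int) - 1 + 1).toNat false) s =
      (List.replicate ((g.length : Int) - 1 + 1).toNat false).set ks true := vset_some hks0
  have hInit : InvA g s (vset (List.replicate ((g.length : Int) - 1 + 1).toNat false) s) [s] := by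
    have hmarked : (vset (List.replicate ((g.length : Int) - 1 + 1).toNat false) s).getD ks false = true := by
      rw [hv1]
      exact getD_set_self (by rw [hlen0]; exact cell_lt (hlen0 ▸ hks0))
    have horigin : ∀ k, (vset (List.replicate ((g.length : Int) - 1 + 1).toNat false) s).getD k false = true → k = ks := by
      intro k hk
      rcases mk_vset_origin hk with h1 | h1
      · rw [mk_replicate] at h1; simp at h1
      · rw [hks0] at h1
        exact (Option.some_injective _ h1.symm)
    refine ⟨by rw [length_vset]; exact hlen0, ?_, ?_, ?_, ?_⟩
    · intro ks' h
      rw [hks] at h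
      rw [← Option.some_injective _ h]
      exact hmarked
    · intro j hj
      rw [List.mem_singleton] at hj
      subst hj
      exact ⟨ks, hks, hmarked⟩
    · intro k hk
      rw [horigin k hk]
      exact ReachC.refl hks
    · intro k hk hnost
      have := horigin k hk
      subst this
      exact absurd hks (hnost s (List.mem_singleton_self s))
  have hFin := dfsLoop_post g s _ _ hInit
  obtain ⟨flen, fs, _, fr, fc⟩ := hFin
  have hdfs : dfs g s = dfsLoop g (vset (List.replicate ((g.length : Int) - 1 + 1).toNat false) s) [s] := rfl
  rw [hdfs]
  exact ⟨flen, marks_char flen fs fr (fun k hk e he => fc k hk (by simp) e he)⟩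

-- ----- B side -----
def InvB (g : List (List Int)) (s : Int) (v : List Bool) : Prop :=
  v.length = g.length ∧
  (∀ ks, cell g.length s = some ks → v.getD ks false = true) ∧
  (∀ k, v.getD k false = true → ReachC g s k)

theorem markEdges_props (es : List Int) : ∀ (v : List Bool) (c : Bool),
    ((markEdges v c es).1.length = v.length) ∧
    (∀ k, v.getD k false = true → (markEdges v c es).1.getD k false = true) ∧
    (∀ k, (markEdges v c es).1.getD k false = true →
      v.getD k false = true ∨ ∃ e ∈ es, cell v.length e = some k) ∧
    ((markEdges v c es).2 = false → (markEdges v c es).1 = v ∧ c = false ∧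
      ∀ e ∈ es, vget v e = true) := by
  induction es with
  | nil =>
    intro v c
    rw [markEdges_nil]
    exact ⟨rfl, fun _ h => h, fun _ h => Or.inl h, fun h => ⟨rfl, h, by simp⟩⟩
  | cons e es ih =>
    intro v c
    rw [markEdges_cons]
    by_cases hve : vget v e = false
    · rw [if_pos hve]
      have hL := length_vset v e
      obtain ⟨l1, mono, orig, unch⟩ := ih (vset v e) true
      refine ⟨l1.trans hL, ?_, ?_, ?_⟩
      · exact fun k h => mono k (mk_vset_mono h)
      · intro k h
        rcases orig k h with h1 | h1
        · rcases mk_vset_origin h1 with h2 | h2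
          · exact Or.inl h2
          · exact Or.inr ⟨e, List.mem_cons_self .., h2⟩
        · obtain ⟨e', he', hc'⟩ := h1
          rw [hL] at hc'
          exact Or.inr ⟨e', List.mem_cons_of_mem _ he', hc'⟩
      · intro h
        exact absurd (unch h).2.1 (by simp)
    · rw [if_neg hve]
      have hve' : vget v e = true := by
        cases h : vget v e
        · exact absurd h hve
        · rfl
      obtain ⟨l1, mono, orig, unch⟩ := ih v c
      refine ⟨l1, mono, ?_, ?_⟩
      · intro k h
        rcases orig k h with h1 | h1
        · exact Or.inl h1
        · obtain ⟨e', he', hc'⟩ := h1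
          exact Or.inr ⟨e', List.mem_cons_of_mem _ he', hc'⟩
      · intro h
        obtain ⟨h1, h2, h3⟩ := unch h
        refine ⟨h1, h2, ?_⟩
        intro e' he'
        rcases List.mem_cons.mp he' with h4 | h4
        · exact h4 ▸ hve'
        · exact h3 _ h4

def sweepF (g : List (List Int)) : List Bool × Bool → Int → List Bool × Bool :=
  fun p node => if vget p.1 node = true then markEdges p.1 p.2 (adj g node) else p

theorem sweep_eq (g : List (List Int)) (v : List Bool) :
    sweep g v = (PySem.List.pyRange 0 g.length 1).foldl (sweepF g) (v, false) := rfl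

theorem sweepGo_props (g : List (List Int)) (s : Int) (ns : List Int)
    (hns : ∀ x ∈ ns, ∃ k, cell g.length x = some k) : ∀ (p : List Bool × Bool),
    ((ns.foldl (sweepF g) p).1.length = p.1.length) ∧
    (∀ k, p.1.getD k false = true → (ns.foldl (sweepF g) p).1.getD k false = true) ∧
    (p.1.length = g.length → (∀ k, p.1.getD k false = true → ReachC g s k) →
      ∀ k, (ns.foldl (sweepF g) p).1.getD k false = true → ReachC g s k) ∧
    ((ns.foldl (sweepF g) p).2 = false → p.2 = false) ∧
    ((ns.foldl (sweepF g) p).2 = false → (ns.foldl (sweepF g) p).1 = p.1 ∧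
      ∀ x ∈ ns, vget p.1 x = true → ∀ e ∈ adj g x, vget p.1 e = true) := by
  induction ns with
  | nil =>
    intro p
    exact ⟨rfl, fun _ h => h, fun _ h => h, fun h => h, fun _ => ⟨rfl, by simp⟩⟩
  | cons x ns ih =>
    intro p
    obtain ⟨kx, hkx⟩ := hns x (List.mem_cons_self ..)
    have hns' : ∀ y ∈ ns, ∃ k, cell g.length y = some k :=
      fun y hy => hns y (List.mem_cons_of_mem _ hy)
    rw [List.foldl_cons]
    by_cases hm : vget p.1 x = true
    · have hstep : sweepF g p x = markEdges p.1 p.2 (adj g x) := by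
        unfold sweepF; rw [if_pos hm]
      rw [hstep]
      obtain ⟨ml, mmono, morig, munch⟩ := markEdges_props (adj g x) p.1 p.2
      obtain ⟨il, imono, ipred, icf, iunch⟩ := (ih hns') (markEdges p.1 p.2 (adj g x))
      refine ⟨il.trans ml, ?_, ?_, ?_, ?_⟩
      · exact fun k h => imono k (mmono k h)
      · intro hl hpred
        refine ipred (ml.trans hl) ?_
        intro k hmk
        rcases morig k hmk with h2 | h2
        · exact hpred k h2
        · obtain ⟨e, he, hce⟩ := h2
          have hRx : ReachC g s kx := by
            apply hpred
            have : vget p.1 x = p.1.getD kx false := vget_some (by rw [hl]; exact hkx)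
            rw [← this]; exact hm
          rw [hl] at hce
          exact ReachC.step hRx ((adj_some hkx) ▸ he) hce
      · intro hf
        exact (munch (icf hf)).2.1
      · intro hf
        obtain ⟨hq1, _, hq3⟩ := munch (icf hf)
        obtain ⟨hr1, hr2⟩ := iunch hf
        rw [hq1] at hr1 hr2
        refine ⟨hr1, ?_⟩
        intro y hy hmy e he
        rcases List.mem_cons.mp hy with h2 | h2
        · exact hq3 e (h2 ▸ he)
        · exact hr2 y h2 hmy e he
    · have hstep : sweepF g p x = p := by
        unfold sweepF; rw [if_neg hm]
      rw [hstep]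
      obtain ⟨il, imono, ipred, icf, iunch⟩ := (ih hns') p
      refine ⟨il, imono, ipred, icf, ?_⟩
      intro hf
      obtain ⟨hr1, hr2⟩ := iunch hf
      refine ⟨hr1, ?_⟩
      intro y hy hmy e he
      rcases List.mem_cons.mp hy with h2 | h2
      · exact absurd (h2 ▸ hmy) hm
      · exact hr2 y h2 hmy e he

theorem pyRange_cells (g : List (List Int)) :
    ∀ x ∈ PySem.List.pyRange 0 (g.length : Int) 1, ∃ k, cell g.length x = some k := by
  intro x hx
  rw [PySem.List.mem_pyRange_one] at hx
  refine ⟨x.toNat, ?_⟩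
  unfold cell
  rw [if_pos hx]

theorem fixLoop_post (g : List (List Int)) (s : Int) :
    ∀ (v : List Bool), InvB g s v → InvB g s (fixLoop g v) ∧
      (∀ k, (fixLoop g v).getD k false = true →
        ∀ e ∈ g.getD k [], vget (fixLoop g v) e = true) := by
  intro v
  fun_induction fixLoop g v with
  | case1 v h ih =>
    intro hI
    apply ih
    obtain ⟨sl, smono, spred, _, _⟩ := sweepGo_props g s _ (pyRange_cells g) (v, false)
    rw [← sweep_eq] at sl smono spred
    exact ⟨sl.trans hI.1, fun ks hks => smono ks (hI.2.1 ks hks), spred hI.1 hI.2.2⟩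
  | case2 v h =>
    intro hI
    have hf : (sweep g v).2 = false := by
      cases hs : (sweep g v).2
      · rfl
      · exact absurd hs h
    obtain ⟨_, _, _, _, sunch⟩ := sweepGo_props g s _ (pyRange_cells g) (v, false)
    rw [← sweep_eq] at sunch
    obtain ⟨heq, hclo⟩ := sunch hf
    rw [heq]
    refine ⟨hI, ?_⟩
    intro k hk e he
    have hkn : k < g.length := by
      by_contra hc
      rw [getD_big (by rw [hI.1]; omega)] at hk
      exact absurd hk (by simp)
    have hx : (k : Int) ∈ PySem.List.pyRange 0 (g.length : Int) 1 := by
      rw [PySem.List.mem_pyRange_one]; omega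
    have hck : cell v.length (k : Int) = some k := by
      rw [hI.1]; exact cell_natCast hkn
    have hvk : vget v (k : Int) = true := by
      rw [vget_some hck]; exact hk
    have := hclo (k : Int) hx hvk e (by rw [adj_some (hI.1 ▸ hck)]; exact he)
    exact this
  
theorem dfs_alt_char {g : List (List Int)} {s : Int} (hP : Pre_dfs g s) :
    (dfs_alt g s).length = g.length ∧
    ∀ k, ((dfs_alt g s).getD k false = true ↔ ReachC g s k) := by
  obtain ⟨ks, hks⟩ := cell_start hP
  have hlen0 : (List.replicate g.length false).length = g.length := by simp
  have hks0 : cell (List.replicate g.length false).length s = some ks := by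
    rw [hlen0]; exact hks
  have hInit : InvB g s (vset (List.replicate g.length false) s) := by
    have hmarked : (vset (List.replicate g.length false) s).getD ks false = true := by
      rw [vset_some hks0]
      exact getD_set_self (by rw [hlen0]; exact cell_lt hks)
    refine ⟨by rw [length_vset]; exact hlen0, ?_, ?_⟩
    · intro ks' h
      rw [hks] at h
      rw [← Option.some_injective _ h]
      exact hmarked
    · intro k hk
      rcases mk_vset_origin hk with h1 | h1
      · rw [mk_replicate] at h1; simp at h1
      · rw [hks0] at h1
        rw [Option.some_injective _ h1.symm]
        exact ReachC.refl hks
  obtain ⟨⟨flen, fs, fr⟩, fc⟩ := fixLoop_post g s _ hInit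
  have hda : dfs_alt g s = fixLoop g (vset (List.replicate g.length false) s) := rfl
  rw [hda]
  exact ⟨flen, marks_char flen fs fr fc⟩

-- ===== VERDICT (by name: the statement is the Claim_ definition above) =====
theorem dfs_spec : Claim_equal_dfs := by
  intro g s _hD hP
  unfold Spec_dfs
  obtain ⟨lA, chA⟩ := dfs_char hP
  obtain ⟨lB, chB⟩ := dfs_alt_char hP
  apply List.ext_getElem (lA.trans lB.symm)
  intro k h1 h2
  have hiff : ((dfs g s)[k] = true) ↔ ((dfs_alt g s)[k] = true) := by
    rw [← List.getD_eq_getElem _ false h1, ← List.getD_eq_getElem _ false h2]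
    exact (chA k).trans (chB k).symm
  cases hA : (dfs g s)[k] with
  | true => exact (hiff.mp hA).symm
  | false =>
    cases hB : (dfs_alt g s)[k] with
    | true => exact absurd (hiff.mpr hB) (by simp [hA])
    | false => rfl
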